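-- pv_equiv track=rewrite | github.com/crshnburn/adventofcode2025 | day8/main.py | create_coordinate_chains
-- ===== SOURCE A (Python) =====
-- def create_coordinate_chains(pairs):
--     """
--     Takes a list of pairs of coordinates and creates chains of coordinates.
--     A chain is formed by connecting pairs that share a common coordinate.
--     Returns the list of chains ordered from largest to smallest.
--     """
--     if not pairs:
--         return []
--
--     # Build an adjacency map: coordinate -> list of connected coordinates
--     adjacency = {}
--     for coord1, coord2 in pairs:
--         if coord1 not in adjacency:
--             adjacency[coord1] = []
--         if coord2 not in adjacency:
--             adjacency[coord2] = []
--         adjacency[coord1].append(coord2)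
--         adjacency[coord2].append(coord1)
--
--     # Find all chains using depth-first search
--     visited = set()
--     chains = []
--
--     def dfs(coord, chain):
--         """Depth-first search to build a chain"""
--         visited.add(coord)
--         chain.append(coord)
--         if coord in adjacency:
--             for neighbor in adjacency[coord]:
--                 if neighbor not in visited:
--                     dfs(neighbor, chain)
--
--     # Start DFS from each unvisited coordinate
--     for coord in adjacency:
--         if coord not in visited:
--             chain = []
--             dfs(coord, chain)
--             chains.append(chain)
--
--     # Sort chains by length (largest to smallest)
--     chains.sort(key=lambda x: len(x), reverse=True)
--
--     return chains
-- ===== SOURCE B (Python) =====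
-- def create_coordinate_chains(pairs):
--     """Dict-free rewrite: nodes list + on-demand neighbor scan + explicit-stack DFS."""
--     if not pairs:
--         return []
--
--     def neighbors(c):
--         out = []
--         for a, b in pairs:
--             if a == c:
--                 out.append(b)
--             if b == c:
--                 out.append(a)
--         return out
--
--     # coordinates in order of first appearance (coord1 before coord2 of each pair)
--     nodes = []
--     seen = set()
--     for a, b in pairs:
--         if a not in seen:
--             seen.add(a)
--             nodes.append(a)
--         if b not in seen:
--             seen.add(b)
--             nodes.append(b)
--
--     visited = set()
--     chains = []
--     for start in nodes:
--         if start in visited: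
--             continue
--         chain = []
--         stack = [start]
--         while stack:
--             c = stack.pop()
--             if c in visited:
--                 continue
--             visited.add(c)
--             chain.append(c)
--             stack.extend(reversed(neighbors(c)))
--         chains.append(chain)
--     chains.sort(key=len, reverse=True)
--     return chains
-- ===== Notes on version B (the rewrite author's own statement) =====
-- stated objective: alternative
-- what changed: B drops A's adjacency dictionary and recursive DFS entirely: it keeps a plain first-appearance node list, computes each coordinate's neighbors on demand by rescanning the pair list, and runs an explicit stack-based DFS loop (visited checked at pop time, neighbors pushed reversed), reproducing A's exact preorder and chain order without a dict or recursion.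
import Mathlib
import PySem

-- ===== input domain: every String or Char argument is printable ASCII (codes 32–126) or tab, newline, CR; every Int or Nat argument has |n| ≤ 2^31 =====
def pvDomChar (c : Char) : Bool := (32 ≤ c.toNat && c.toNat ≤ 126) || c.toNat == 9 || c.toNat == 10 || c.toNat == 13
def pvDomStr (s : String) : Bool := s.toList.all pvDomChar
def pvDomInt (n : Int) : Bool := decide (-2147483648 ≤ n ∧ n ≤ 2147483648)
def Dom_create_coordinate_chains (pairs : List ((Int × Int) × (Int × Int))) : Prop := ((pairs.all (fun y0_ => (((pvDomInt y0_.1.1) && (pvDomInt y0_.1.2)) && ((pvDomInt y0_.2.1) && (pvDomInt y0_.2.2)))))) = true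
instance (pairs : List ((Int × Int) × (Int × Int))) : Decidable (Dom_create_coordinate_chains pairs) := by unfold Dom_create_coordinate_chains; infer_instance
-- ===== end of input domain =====

-- B drops A's adjacency dict and recursion: first-appearance node list, on-demand neighbor
-- scans of the pair list, and an explicit stack-based DFS loop; return values proved equal.

-- ===== PORT A =====
-- A's adjacency construction: dict coord -> list of connected coords.
def pvAdjStep (d : PySem.Dict (Int × Int) (List (Int × Int))) (p : (Int × Int) × (Int × Int)) :
    PySem.Dict (Int × Int) (List (Int × Int)) :=
  let d := if d.contains p.1 then d else d.insert p.1 []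
  let d := if d.contains p.2 then d else d.insert p.2 []
  let d := d.modify p.1 [] (fun l => l ++ [p.2])
  d.modify p.2 [] (fun l => l ++ [p.1])

def pvAdjacency (pairs : List ((Int × Int) × (Int × Int))) : PySem.Dict (Int × Int) (List (Int × Int)) :=
  pairs.foldl pvAdjStep PySem.Dict.empty

-- A's recursive dfs(coord, chain) with the visited set threaded; the Nat fuel is ONLY a
-- termination guard (each nested call is on a freshly visited coordinate, so the fuel
-- 2*len(pairs)+1 passed by create_coordinate_chains is never exhausted).
mutual
def pvDfsA (adj : PySem.Dict (Int × Int) (List (Int × Int))) :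
    Nat → (Int × Int) → List (Int × Int) → PySem.Set (Int × Int) →
    List (Int × Int) × PySem.Set (Int × Int)
  | 0, _, chain, visited => (chain, visited)
  | Nat.succ fuel, coord, chain, visited =>
      let visited' := PySem.Set.add visited coord
      let chain' := chain ++ [coord]
      if adj.contains coord then
        pvDfsListA adj fuel (adj.getD coord []) chain' visited'
      else (chain', visited')
  termination_by fuel _ _ _ => (fuel, 0)

def pvDfsListA (adj : PySem.Dict (Int × Int) (List (Int × Int))) :
    Nat → List (Int × Int) → List (Int × Int) → PySem.Set (Int × Int) →
    List (Int × Int) × PySem.Set (Int × Int)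
  | _, [], chain, visited => (chain, visited)
  | fuel, n :: ns, chain, visited =>
      if visited.contains n then pvDfsListA adj fuel ns chain visited
      else
        let p := pvDfsA adj fuel n chain visited
        pvDfsListA adj fuel ns p.1 p.2
  termination_by fuel ns _ _ => (fuel, ns.length + 1)
end

def create_coordinate_chains (pairs : List ((Int × Int) × (Int × Int))) : List (List (Int × Int)) :=
  match pairs with
  | [] => []
  | _ =>
    let adjacency := pvAdjacency pairs
    let st := adjacency.keys.foldl
      (fun (st : List (List (Int × Int)) × PySem.Set (Int × Int)) coord =>
        if st.2.contains coord then st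
        else
          let p := pvDfsA adjacency (2 * pairs.length + 1) coord [] st.2
          (st.1 ++ [p.1], p.2)) ([], PySem.Set.empty)
    PySem.List.sorted st.1 (fun x => x.length) true

-- ===== PORT B =====
-- Source B's 'neighbors' helper: scan the pair list, collecting the other endpoint of every
-- pair that touches c (both endpoints when the pair is (c, c)), in pair order.
def pvNbStep (c : Int × Int) (out : List (Int × Int)) (p : (Int × Int) × (Int × Int)) :
    List (Int × Int) :=
  let out := if p.1 == c then out ++ [p.2] else out
  if p.2 == c then out ++ [p.1] else out

def pvNeighbors (pairs : List ((Int × Int) × (Int × Int))) (c : Int × Int) : List (Int × Int) :=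
  pairs.foldl (pvNbStep c) []

-- Source B's nodes/seen loop: the coordinates in order of first appearance.
def pvNodeStep (st : List (Int × Int) × PySem.Set (Int × Int)) (p : (Int × Int) × (Int × Int)) :
    List (Int × Int) × PySem.Set (Int × Int) :=
  let st := if st.2.contains p.1 then st else (st.1 ++ [p.1], PySem.Set.add st.2 p.1)
  if st.2.contains p.2 then st else (st.1 ++ [p.2], PySem.Set.add st.2 p.2)

def pvNodes (pairs : List ((Int × Int) × (Int × Int))) : List (Int × Int) :=
  (pairs.foldl pvNodeStep ([], PySem.Set.empty)).1

-- Source B's 'while stack' loop; the stack is modelled head-as-top (Python append/pop work at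
-- the far end), so 'stack.extend(reversed(neighbors(c)))' is the reverse foldl push.  The
-- Nat fuel is ONLY a termination guard, decremented exactly when a new coordinate is
-- expanded; the fuel 2*len(pairs)+1 is never exhausted.
def pvStackB (nb : (Int × Int) → List (Int × Int)) :
    Nat → List (Int × Int) → List (Int × Int) → PySem.Set (Int × Int) →
    List (Int × Int) × PySem.Set (Int × Int)
  | _, [], chain, visited => (chain, visited)
  | fuel, coord :: stack, chain, visited =>
      if visited.contains coord then pvStackB nb fuel stack chain visited
      else
        match fuel with
        | 0 => (chain, visited)
        | Nat.succ fuel' =>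
            pvStackB nb fuel'
              ((nb coord).reverse.foldl (fun st n => n :: st) stack)
              (chain ++ [coord]) (PySem.Set.add visited coord)
termination_by fuel stack _ _ => (fuel, stack.length)

def create_coordinate_chains_alt (pairs : List ((Int × Int) × (Int × Int))) : List (List (Int × Int)) :=
  if pairs.isEmpty then []
  else
    let st := (pvNodes pairs).foldl
      (fun (st : List (List (Int × Int)) × PySem.Set (Int × Int)) start =>
        if st.2.contains start then st
        else
          let p := pvStackB (pvNeighbors pairs) (2 * pairs.length + 1) [start] [] st.2
          (st.1 ++ [p.1], p.2)) ([], PySem.Set.empty)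
    PySem.List.sorted st.1 (fun x => x.length) true

-- ===== PRECONDITION & SPEC =====
def Spec_create_coordinate_chains (pairs : List ((Int × Int) × (Int × Int))) (out : List (List (Int × Int))) : Prop := out = create_coordinate_chains_alt pairs
instance (pairs : List ((Int × Int) × (Int × Int))) (out : List (List (Int × Int))) : Decidable (Spec_create_coordinate_chains pairs out) := by unfold Spec_create_coordinate_chains; infer_instance

-- ===== CLAIM (what is proved, stated in full; the proofs are below) =====
def Claim_equal_create_coordinate_chains : Prop := ∀ (pairs : List ((Int × Int) × (Int × Int))), Dom_create_coordinate_chains pairs → Spec_create_coordinate_chains pairs (create_coordinate_chains pairs)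

-- ===== LEMMAS AND PROOFS =====

-- number of coordinates of the universe U not yet visited
def pvUnvis (U : List (Int × Int)) (visited : PySem.Set (Int × Int)) : Nat :=
  (U.filter (fun c => !decide (c ∈ visited))).length

-- the invariant tying the adjacency dict to a coordinate universe U
def pvInvAdj (adj : PySem.Dict (Int × Int) (List (Int × Int))) (U : List (Int × Int)) : Prop :=
  (∀ k ∈ adj.keys, k ∈ U) ∧ (∀ k c, c ∈ adj.getD k [] → c ∈ U)

theorem pvLenFilterNot_le {α : Type} (p q : α → Bool) (himp : ∀ x, p x = true → q x = true) :
    ∀ l : List α, (l.filter (fun x => !q x)).length ≤ (l.filter (fun x => !p x)).length := by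
  intro l
  induction l with
  | nil => simp
  | cons a t ih =>
    simp only [List.filter_cons]
    cases hp : p a
    · cases hq : q a <;> simp <;> omega
    · have hq := himp a hp
      simp [hq]; omega

theorem pvLenFilterNot_lt {α : Type} (p q : α → Bool) (himp : ∀ x, p x = true → q x = true)
    (c : α) (hpc : p c = false) (hqc : q c = true) :
    ∀ l : List α, c ∈ l →
      (l.filter (fun x => !q x)).length < (l.filter (fun x => !p x)).length := by
  intro l
  induction l with
  | nil => intro h; simp at h
  | cons a t ih =>
    intro hc
    simp only [List.filter_cons]
    by_cases hac : a = c
    · subst hac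
      have hle := pvLenFilterNot_le p q himp t
      simp [hpc, hqc]; omega
    · have hct : c ∈ t := by
        rcases List.mem_cons.mp hc with h | h
        · exact absurd h.symm hac
        · exact h
      have hlt := ih hct
      cases hp : p a
      · cases hq : q a <;> simp <;> omega
      · have hq := himp a hp
        simp [hq]; omega

theorem pvUnvis_anti (U : List (Int × Int)) (v w : PySem.Set (Int × Int))
    (h : ∀ x, x ∈ v → x ∈ w) : pvUnvis U w ≤ pvUnvis U v := by
  exact pvLenFilterNot_le (fun c => decide (c ∈ v)) (fun c => decide (c ∈ w))
    (fun x hx => by simpa using h x (by simpa using hx)) U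

theorem pvUnvis_add_lt (U : List (Int × Int)) (v : PySem.Set (Int × Int))
    (c : Int × Int) (hcU : c ∈ U) (hcv : c ∉ v) :
    pvUnvis U (PySem.Set.add v c) < pvUnvis U v := by
  refine pvLenFilterNot_lt (fun x => decide (x ∈ v)) (fun x => decide (x ∈ PySem.Set.add v c))
    (fun x hx => ?_) c (by simpa using hcv) ?_ U hcU
  · simp only [decide_eq_true_eq] at *
    rw [PySem.Set.mem_add]; left; exact hx
  · simp only [decide_eq_true_eq]
    rw [PySem.Set.mem_add]; right; rfl

theorem pvUnvis_pos (U : List (Int × Int)) (v : PySem.Set (Int × Int))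
    (c : Int × Int) (hcU : c ∈ U) (hcv : c ∉ v) : 0 < pvUnvis U v := by
  unfold pvUnvis
  have : c ∈ U.filter (fun x => !decide (x ∈ v)) := by
    rw [List.mem_filter]; exact ⟨hcU, by simpa using hcv⟩
  exact List.length_pos_of_mem this

theorem pvUnvis_le_len (U : List (Int × Int)) (v : PySem.Set (Int × Int)) :
    pvUnvis U v ≤ U.length := by
  unfold pvUnvis; exact List.length_filter_le _ _

-- visited only grows through the recursive dfs
theorem pvGrow (adj : PySem.Dict (Int × Int) (List (Int × Int))) :
    ∀ f : Nat,
      (∀ c chain v, ∀ x, x ∈ v → x ∈ (pvDfsA adj f c chain v).2) ∧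
      (∀ ns chain v, ∀ x, x ∈ v → x ∈ (pvDfsListA adj f ns chain v).2) := by
  intro f
  induction f with
  | zero =>
    have hA : ∀ c chain v, ∀ x : Int × Int, x ∈ v → x ∈ (pvDfsA adj 0 c chain v).2 := by
      intro c chain v x hx; simpa [pvDfsA] using hx
    refine ⟨hA, ?_⟩
    intro ns
    induction ns with
    | nil => intro chain v x hx; simpa [pvDfsListA] using hx
    | cons n t ih =>
      intro chain v x hx
      by_cases hn : n ∈ v
      · simpa [pvDfsListA, hn] using ih chain v x hx
      · simp only [pvDfsListA]
        simp [hn]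
        exact ih _ _ x (hA n chain v x hx)
  | succ f ihf =>
    have hA : ∀ c chain v, ∀ x : Int × Int, x ∈ v → x ∈ (pvDfsA adj (f+1) c chain v).2 := by
      intro c chain v x hx
      have hx' : x ∈ PySem.Set.add v c := by rw [PySem.Set.mem_add]; left; exact hx
      by_cases hc : adj.contains c
      · simp only [pvDfsA, hc, if_true]
        exact ihf.2 _ _ _ x hx'
      · simpa [pvDfsA, hc] using hx'
    refine ⟨hA, ?_⟩
    intro ns
    induction ns with
    | nil => intro chain v x hx; simpa [pvDfsListA] using hx
    | cons n t ih =>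
      intro chain v x hx
      by_cases hn : n ∈ v
      · simpa [pvDfsListA, hn] using ih chain v x hx
      · simp only [pvDfsListA]
        simp [hn]
        exact ih _ _ x (hA n chain v x hx)

theorem pvStackB_skip (nb : (Int × Int) → List (Int × Int)) (f : Nat)
    (c : Int × Int) (st ch : List (Int × Int)) (v : PySem.Set (Int × Int)) (h : c ∈ v) :
    pvStackB nb f (c :: st) ch v = pvStackB nb f st ch v := by
  cases f <;> simp [pvStackB, h]

theorem pvStackB_expand (nb : (Int × Int) → List (Int × Int)) (f' : Nat)
    (c : Int × Int) (st ch : List (Int × Int)) (v : PySem.Set (Int × Int)) (h : c ∉ v) :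
    pvStackB nb (f' + 1) (c :: st) ch v =
      pvStackB nb f' (nb c ++ st) (ch ++ [c]) (PySem.Set.add v c) := by
  simp [pvStackB, h, PySem.Set.add]

-- the results of the dfs runs do not depend on the exact fuel, as long as it dominates
-- the number of unvisited coordinates
theorem pvMono (adj : PySem.Dict (Int × Int) (List (Int × Int))) (U : List (Int × Int))
    (hinv : pvInvAdj adj U) : ∀ k : Nat,
    (∀ c chain v f g, pvUnvis U v ≤ k → pvUnvis U v ≤ f → pvUnvis U v ≤ g → c ∈ U → c ∉ v →
       pvDfsA adj f c chain v = pvDfsA adj g c chain v) ∧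
    (∀ ns chain v f g, pvUnvis U v ≤ k → pvUnvis U v ≤ f → pvUnvis U v ≤ g → (∀ x ∈ ns, x ∈ U) →
       pvDfsListA adj f ns chain v = pvDfsListA adj g ns chain v) ∧
    (∀ st chain v f g, pvUnvis U v ≤ k → pvUnvis U v ≤ f → pvUnvis U v ≤ g → (∀ x ∈ st, x ∈ U) →
       pvStackB (fun c => adj.getD c []) f st chain v = pvStackB (fun c => adj.getD c []) g st chain v) := by
  intro k
  induction k with
  | zero =>
    have hA : ∀ c chain v (f g : Nat), pvUnvis U v ≤ 0 → pvUnvis U v ≤ f → pvUnvis U v ≤ g →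
        c ∈ U → c ∉ v → pvDfsA adj f c chain v = pvDfsA adj g c chain v := by
      intro c chain v f g hk hf hg hcU hcv
      exact absurd (pvUnvis_pos U v c hcU hcv) (by omega)
    refine ⟨hA, ?_, ?_⟩
    · intro ns
      induction ns with
      | nil => intro chain v f g _ _ _ _; simp [pvDfsListA]
      | cons n t ih =>
        intro chain v f g hk hf hg hU
        by_cases hn : n ∈ v
        · simp only [pvDfsListA]
          simp [hn]
          exact ih chain v f g hk hf hg (fun x hx => hU x (List.mem_cons_of_mem _ hx))
        · exact absurd (pvUnvis_pos U v n (hU n List.mem_cons_self) hn) (by omega)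
    · intro st
      induction st with
      | nil => intro chain v f g _ _ _ _; simp [pvStackB]
      | cons c t ih =>
        intro chain v f g hk hf hg hU
        by_cases hc : c ∈ v
        · rw [pvStackB_skip _ f c t chain v hc, pvStackB_skip _ g c t chain v hc]
          exact ih chain v f g hk hf hg (fun x hx => hU x (List.mem_cons_of_mem _ hx))
        · exact absurd (pvUnvis_pos U v c (hU c List.mem_cons_self) hc) (by omega)
  | succ k ihk =>
    obtain ⟨_, ihL, ihS⟩ := ihk
    have hA : ∀ c chain v (f g : Nat), pvUnvis U v ≤ k + 1 → pvUnvis U v ≤ f → pvUnvis U v ≤ g →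
        c ∈ U → c ∉ v → pvDfsA adj f c chain v = pvDfsA adj g c chain v := by
      intro c chain v f g hk hf hg hcU hcv
      have hpos := pvUnvis_pos U v c hcU hcv
      have hlt := pvUnvis_add_lt U v c hcU hcv
      obtain ⟨f', rfl⟩ : ∃ f', f = f' + 1 := ⟨f - 1, by omega⟩
      obtain ⟨g', rfl⟩ : ∃ g', g = g' + 1 := ⟨g - 1, by omega⟩
      by_cases hc : adj.contains c
      · simp only [pvDfsA, hc, if_true]
        exact ihL (adj.getD c []) (chain ++ [c]) (PySem.Set.add v c) f' g'
          (by omega) (by omega) (by omega) (fun x hx => hinv.2 c x hx)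
      · simp [pvDfsA, hc]
    refine ⟨hA, ?_, ?_⟩
    · intro ns
      induction ns with
      | nil => intro chain v f g _ _ _ _; simp [pvDfsListA]
      | cons n t ih =>
        intro chain v f g hk hf hg hU
        by_cases hn : n ∈ v
        · simp only [pvDfsListA]
          simp [hn]
          exact ih chain v f g hk hf hg (fun x hx => hU x (List.mem_cons_of_mem _ hx))
        · have he := hA n chain v f g hk hf hg (hU n List.mem_cons_self) hn
          simp only [pvDfsListA]
          simp [hn]
          rw [he]
          have hgrow : ∀ x, x ∈ v → x ∈ (pvDfsA adj g n chain v).2 :=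
            (pvGrow adj g).1 n chain v
          have hanti := pvUnvis_anti U v (pvDfsA adj g n chain v).2 hgrow
          exact ih _ _ f g (by omega) (by omega) (by omega)
            (fun x hx => hU x (List.mem_cons_of_mem _ hx))
    · intro st
      induction st with
      | nil => intro chain v f g _ _ _ _; simp [pvStackB]
      | cons c t ih =>
        intro chain v f g hk hf hg hU
        by_cases hc : c ∈ v
        · rw [pvStackB_skip _ f c t chain v hc, pvStackB_skip _ g c t chain v hc]
          exact ih chain v f g hk hf hg (fun x hx => hU x (List.mem_cons_of_mem _ hx))
        · have hpos := pvUnvis_pos U v c (hU c List.mem_cons_self) hc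
          have hlt := pvUnvis_add_lt U v c (hU c List.mem_cons_self) hc
          obtain ⟨f', rfl⟩ : ∃ f', f = f' + 1 := ⟨f - 1, by omega⟩
          obtain ⟨g', rfl⟩ : ∃ g', g = g' + 1 := ⟨g - 1, by omega⟩
          rw [pvStackB_expand _ f' c t chain v hc, pvStackB_expand _ g' c t chain v hc]
          exact ihS _ (chain ++ [c]) (PySem.Set.add v c) f' g'
            (by omega) (by omega) (by omega)
            (fun x hx => by
              rcases List.mem_append.mp hx with h | h
              · exact hinv.2 c x h
              · exact hU x (List.mem_cons_of_mem _ h))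

-- the stack run on ns ++ rest first performs the recursive dfs over ns, then continues with rest
theorem pvSim (adj : PySem.Dict (Int × Int) (List (Int × Int))) (U : List (Int × Int))
    (hinv : pvInvAdj adj U) : ∀ k : Nat,
    ∀ ns rest chain v f, pvUnvis U v ≤ k → pvUnvis U v ≤ f →
      (∀ x ∈ ns, x ∈ U) → (∀ x ∈ rest, x ∈ U) →
      pvStackB (fun c => adj.getD c []) f (ns ++ rest) chain v =
        pvStackB (fun c => adj.getD c []) f rest (pvDfsListA adj f ns chain v).1 (pvDfsListA adj f ns chain v).2 := by
  intro k
  induction k with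
  | zero =>
    intro ns
    induction ns with
    | nil => intro rest chain v f _ _ _ _; simp [pvDfsListA]
    | cons n t ih =>
      intro rest chain v f hk hf hns hrest
      have hn : n ∈ v := by
        by_contra hn
        exact absurd (pvUnvis_pos U v n (hns n List.mem_cons_self) hn) (by omega)
      rw [List.cons_append, pvStackB_skip _ f n (t ++ rest) chain v hn]
      simp only [pvDfsListA]
      simp [hn]
      exact ih rest chain v f hk hf (fun x hx => hns x (List.mem_cons_of_mem _ hx)) hrest
  | succ k ihk =>
    intro ns
    induction ns with
    | nil => intro rest chain v f _ _ _ _; simp [pvDfsListA]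
    | cons n t ih =>
      intro rest chain v f hk hf hns hrest
      have htU : ∀ x ∈ t, x ∈ U := fun x hx => hns x (List.mem_cons_of_mem _ hx)
      by_cases hn : n ∈ v
      · rw [List.cons_append, pvStackB_skip _ f n (t ++ rest) chain v hn]
        simp only [pvDfsListA]
        simp [hn]
        exact ih rest chain v f hk hf htU hrest
      · have hnU := hns n List.mem_cons_self
        have hpos := pvUnvis_pos U v n hnU hn
        have hlt := pvUnvis_add_lt U v n hnU hn
        obtain ⟨f', rfl⟩ : ∃ f', f = f' + 1 := ⟨f - 1, by omega⟩
        have hnbrU : ∀ x ∈ adj.getD n [], x ∈ U := fun x hx => hinv.2 n x hx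
        have htrU : ∀ x ∈ t ++ rest, x ∈ U := fun x hx => by
          rcases List.mem_append.mp hx with h | h
          · exact htU x h
          · exact hrest x h
        rw [List.cons_append, pvStackB_expand _ f' n (t ++ rest) chain v hn]
        rw [ihk (adj.getD n []) (t ++ rest) (chain ++ [n]) (PySem.Set.add v n) f'
          (by omega) (by omega) hnbrU htrU]
        -- abbreviate the result of the dfs over the neighbours
        have hq2 : pvUnvis U (pvDfsListA adj f' (adj.getD n []) (chain ++ [n]) (PySem.Set.add v n)).2
            ≤ pvUnvis U (PySem.Set.add v n) :=
          pvUnvis_anti U _ _ ((pvGrow adj f').2 (adj.getD n []) (chain ++ [n]) (PySem.Set.add v n))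
        rw [ihk t rest _ _ f' (by omega) (by omega) htU hrest]
        -- identify the head dfs call
        have hq0 : pvDfsA adj (f' + 1) n chain v
            = pvDfsListA adj f' (adj.getD n []) (chain ++ [n]) (PySem.Set.add v n) := by
          by_cases hc : adj.contains n
          · simp [pvDfsA, hc]
          · rw [PySem.Dict.getD_of_not_contains adj ([] : List (Int × Int)) (by simpa using hc)]
            simp [pvDfsA, hc, pvDfsListA]
        have hRHS : pvDfsListA adj (f' + 1) (n :: t) chain v
            = pvDfsListA adj (f' + 1) t
                (pvDfsListA adj f' (adj.getD n []) (chain ++ [n]) (PySem.Set.add v n)).1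
                (pvDfsListA adj f' (adj.getD n []) (chain ++ [n]) (PySem.Set.add v n)).2 := by
          simp only [pvDfsListA]
          simp [hn]
          rw [hq0]
          simp [PySem.Set.add, hn]
        rw [hRHS]
        -- align the fuels of the tail runs
        have hmL := (pvMono adj U hinv
            (pvUnvis U (pvDfsListA adj f' (adj.getD n []) (chain ++ [n]) (PySem.Set.add v n)).2)).2.1
          t (pvDfsListA adj f' (adj.getD n []) (chain ++ [n]) (PySem.Set.add v n)).1
          (pvDfsListA adj f' (adj.getD n []) (chain ++ [n]) (PySem.Set.add v n)).2
          f' (f' + 1) le_rfl (by omega) (by omega) htU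
        rw [hmL]
        have hr2 : pvUnvis U (pvDfsListA adj (f' + 1) t
              (pvDfsListA adj f' (adj.getD n []) (chain ++ [n]) (PySem.Set.add v n)).1
              (pvDfsListA adj f' (adj.getD n []) (chain ++ [n]) (PySem.Set.add v n)).2).2
            ≤ pvUnvis U (pvDfsListA adj f' (adj.getD n []) (chain ++ [n]) (PySem.Set.add v n)).2 :=
          pvUnvis_anti U _ _ ((pvGrow adj (f' + 1)).2 t _ _)
        exact (pvMono adj U hinv (pvUnvis U (pvDfsListA adj (f' + 1) t
              (pvDfsListA adj f' (adj.getD n []) (chain ++ [n]) (PySem.Set.add v n)).1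
              (pvDfsListA adj f' (adj.getD n []) (chain ++ [n]) (PySem.Set.add v n)).2).2)).2.2
          rest _ _ f' (f' + 1) le_rfl (by omega) (by omega) hrest

theorem pvAdjStep_keys (U : List (Int × Int)) (d : PySem.Dict (Int × Int) (List (Int × Int)))
    (p : (Int × Int) × (Int × Int)) (h1 : ∀ k ∈ d.keys, k ∈ U) (hp1 : p.1 ∈ U) (hp2 : p.2 ∈ U) :
    ∀ k ∈ (pvAdjStep d p).keys, k ∈ U := by
  intro k hk
  simp only [pvAdjStep] at hk
  split_ifs at hk <;>
  · simp only [PySem.Dict.keys_modify, PySem.Dict.mem_keys_insert] at hk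
    have h : k = p.1 ∨ k = p.2 ∨ k ∈ d.keys := by tauto
    rcases h with h | h | h
    · exact h ▸ hp1
    · exact h ▸ hp2
    · exact h1 _ h

theorem pvAdjStep_getD (U : List (Int × Int)) (d : PySem.Dict (Int × Int) (List (Int × Int)))
    (p : (Int × Int) × (Int × Int)) (h2 : ∀ k c, c ∈ d.getD k [] → c ∈ U)
    (hp1 : p.1 ∈ U) (hp2 : p.2 ∈ U) :
    ∀ k c, c ∈ (pvAdjStep d p).getD k [] → c ∈ U := by
  intro k c hc
  simp only [pvAdjStep] at hc
  split_ifs at hc <;>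
  · simp only [PySem.Dict.getD_modify, PySem.Dict.getD_insert] at hc
    split_ifs at hc <;> (try simp only [List.mem_append, List.mem_singleton] at hc) <;>
    · have h : c = p.1 ∨ c = p.2 ∨ (c ∈ d.getD k [] ∨ c ∈ d.getD p.1 [] ∨ c ∈ d.getD p.2 []) := by
        tauto
      rcases h with h | h | h | h | h
      · exact h ▸ hp1
      · exact h ▸ hp2
      · exact h2 _ _ h
      · exact h2 _ _ h
      · exact h2 _ _ h

theorem pvAdj_inv_gen (U : List (Int × Int)) :
    ∀ (ps : List ((Int × Int) × (Int × Int))) (d : PySem.Dict (Int × Int) (List (Int × Int))),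
      (∀ k ∈ d.keys, k ∈ U) → (∀ k c, c ∈ d.getD k [] → c ∈ U) →
      (∀ p ∈ ps, p.1 ∈ U ∧ p.2 ∈ U) →
      pvInvAdj (ps.foldl pvAdjStep d) U := by
  intro ps
  induction ps with
  | nil => intro d h1 h2 _; exact ⟨h1, h2⟩
  | cons p t ih =>
    intro d h1 h2 hps
    have hp := hps p List.mem_cons_self
    exact ih (pvAdjStep d p)
      (pvAdjStep_keys U d p h1 hp.1 hp.2)
      (pvAdjStep_getD U d p h2 hp.1 hp.2)
      (fun q hq => hps q (List.mem_cons_of_mem _ hq))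

theorem pvAdj_inv (pairs : List ((Int × Int) × (Int × Int))) :
    pvInvAdj (pvAdjacency pairs) (pairs.flatMap (fun p => [p.1, p.2])) := by
  apply pvAdj_inv_gen
  · intro k hk; simp [PySem.Dict.keys_empty] at hk
  · intro k c hc; rw [PySem.Dict.getD_empty] at hc; simp at hc
  · intro p hp
    constructor <;>
    · rw [List.mem_flatMap]
      exact ⟨p, hp, by simp⟩

theorem pvFlatMap_len : ∀ l : List ((Int × Int) × (Int × Int)),
    (l.flatMap (fun p => [p.1, p.2])).length = 2 * l.length := by
  intro l
  induction l with
  | nil => rfl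
  | cons p t ih => simp only [List.flatMap_cons, List.length_append, ih]; simp; omega

-- a single start: the stack run equals the recursive dfs
theorem pvRun_eq (adj : PySem.Dict (Int × Int) (List (Int × Int))) (U : List (Int × Int))
    (hinv : pvInvAdj adj U) (F : Nat) (x : Int × Int) (v : PySem.Set (Int × Int))
    (hF : pvUnvis U v ≤ F) (hx : x ∈ U) (hxv : x ∉ v) :
    pvStackB (fun c => adj.getD c []) F [x] [] v = pvDfsA adj F x [] v := by
  have h1 : pvStackB (fun c => adj.getD c []) F ([x] ++ []) [] v
      = pvStackB (fun c => adj.getD c []) F [] (pvDfsListA adj F [x] [] v).1 (pvDfsListA adj F [x] [] v).2 :=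
    pvSim adj U hinv (pvUnvis U v) [x] [] [] v F le_rfl hF
      (fun y hy => by
        simp only [List.mem_singleton] at hy
        exact hy ▸ hx)
      (fun y hy => by simp at hy)
  have h2 : pvDfsListA adj F [x] [] v = pvDfsA adj F x [] v := by
    simp [pvDfsListA, hxv]
  simpa [pvStackB, h2] using h1

-- B's neighbor scan computes exactly the adjacency-dict entry -----------------

theorem pvNbStep_append (c : Int × Int) (acc : List (Int × Int)) (p : (Int × Int) × (Int × Int)) :
    pvNbStep c acc p = acc ++ pvNbStep c [] p := by
  simp only [pvNbStep]
  split_ifs <;> simp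

theorem pvNb_acc (c : Int × Int) :
    ∀ (ps : List ((Int × Int) × (Int × Int))) (acc : List (Int × Int)),
      ps.foldl (pvNbStep c) acc = acc ++ ps.foldl (pvNbStep c) [] := by
  intro ps
  induction ps with
  | nil => intro acc; simp
  | cons p t ih =>
    intro acc
    simp only [List.foldl_cons]
    rw [ih (pvNbStep c acc p), ih (pvNbStep c [] p), pvNbStep_append c acc p,
      List.append_assoc]

theorem pvAdjStep_getD_eq (d : PySem.Dict (Int × Int) (List (Int × Int)))
    (p : (Int × Int) × (Int × Int)) (c : Int × Int) :
    (pvAdjStep d p).getD c [] = d.getD c [] ++ pvNbStep c [] p := by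
  have hins : ∀ (d' : PySem.Dict (Int × Int) (List (Int × Int))) (k x : Int × Int),
      ((if d'.contains k then d' else d'.insert k []).getD x []) = d'.getD x [] := by
    intro d' k x
    split_ifs with h
    · rfl
    · rw [PySem.Dict.getD_insert]
      split_ifs with hxk
      · subst hxk
        exact (PySem.Dict.getD_of_not_contains d' [] (by simpa using h)).symm
      · rfl
  simp only [pvAdjStep, PySem.Dict.getD_modify, hins, pvNbStep, beq_iff_eq]
  by_cases hc2 : c = p.2 <;> by_cases hc1 : c = p.1
  · simp_all
  · have h21 : ¬ p.1 = p.2 := fun h => hc1 (hc2.trans h.symm)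
    simp_all
  · have h12 : ¬ p.2 = p.1 := fun h => hc2 (hc1.trans h.symm)
    simp_all
  · have ha : ¬ p.1 = c := fun h => hc1 h.symm
    have hb : ¬ p.2 = c := fun h => hc2 h.symm
    simp_all

theorem pvAdj_getD_gen :
    ∀ (ps : List ((Int × Int) × (Int × Int))) (d : PySem.Dict (Int × Int) (List (Int × Int)))
      (c : Int × Int),
      (ps.foldl pvAdjStep d).getD c [] = d.getD c [] ++ ps.foldl (pvNbStep c) [] := by
  intro ps
  induction ps with
  | nil => intro d c; simp
  | cons p t ih =>
    intro d c
    simp only [List.foldl_cons]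
    rw [ih, pvAdjStep_getD_eq, pvNb_acc c t (pvNbStep c [] p), List.append_assoc]

theorem pvNeighbors_eq (pairs : List ((Int × Int) × (Int × Int))) (c : Int × Int) :
    pvNeighbors pairs c = (pvAdjacency pairs).getD c [] := by
  unfold pvNeighbors pvAdjacency
  rw [pvAdj_getD_gen]
  rw [PySem.Dict.getD_empty]
  simp

-- B's nodes list is exactly A's dict key order -------------------------------

theorem pvNodes_gen :
    ∀ (ps : List ((Int × Int) × (Int × Int))) (d : PySem.Dict (Int × Int) (List (Int × Int)))
      (acc : List (Int × Int) × PySem.Set (Int × Int)),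
      acc.1 = d.keys → (∀ x, x ∈ acc.2 ↔ d.contains x = true) →
      (ps.foldl pvNodeStep acc).1 = (ps.foldl pvAdjStep d).keys := by
  intro ps
  induction ps with
  | nil => intro d acc h1 _; simpa using h1
  | cons p t ih =>
    intro d acc h1 h2
    simp only [List.foldl_cons]
    -- first endpoint
    set d1 : PySem.Dict (Int × Int) (List (Int × Int)) :=
      if d.contains p.1 then d else d.insert p.1 [] with hd1
    set a1 : List (Int × Int) × PySem.Set (Int × Int) :=
      if acc.2.contains p.1 then acc else (acc.1 ++ [p.1], PySem.Set.add acc.2 p.1) with ha1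
    have hcontains : ∀ x : Int × Int, (acc.2.contains x = true) ↔ d.contains x = true :=
      fun x => (PySem.Set.contains_iff acc.2 x).trans (h2 x)
    have h1' : a1.1 = d1.keys := by
      rw [ha1, hd1]
      by_cases h : d.contains p.1 = true
      · rw [if_pos ((hcontains p.1).mpr h), if_pos h]; exact h1
      · have hb : ¬ acc.2.contains p.1 = true := fun hb => h ((hcontains p.1).mp hb)
        rw [if_neg hb, if_neg h]
        rw [PySem.Dict.keys_insert_of_not_contains d [] (by simpa using h)]
        simp [h1]
    have h2' : ∀ x, x ∈ a1.2 ↔ d1.contains x = true := by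
      intro x
      rw [ha1, hd1]
      by_cases h : d.contains p.1 = true
      · rw [if_pos ((hcontains p.1).mpr h), if_pos h]; exact h2 x
      · have hb : ¬ acc.2.contains p.1 = true := fun hb => h ((hcontains p.1).mp hb)
        rw [if_neg hb, if_neg h]
        show x ∈ PySem.Set.add acc.2 p.1 ↔ _
        rw [PySem.Set.mem_add, PySem.Dict.contains_insert]
        simp [h2 x, beq_iff_eq, or_comm]
    -- second endpoint
    set d2 : PySem.Dict (Int × Int) (List (Int × Int)) :=
      if d1.contains p.2 then d1 else d1.insert p.2 [] with hd2
    set a2 : List (Int × Int) × PySem.Set (Int × Int) :=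
      if a1.2.contains p.2 then a1 else (a1.1 ++ [p.2], PySem.Set.add a1.2 p.2) with ha2
    have hcontains1 : ∀ x : Int × Int, (a1.2.contains x = true) ↔ d1.contains x = true :=
      fun x => (PySem.Set.contains_iff a1.2 x).trans (h2' x)
    have h1x : a2.1 = d2.keys := by
      rw [ha2, hd2]
      by_cases h : d1.contains p.2 = true
      · rw [if_pos ((hcontains1 p.2).mpr h), if_pos h]; exact h1'
      · have hb : ¬ a1.2.contains p.2 = true := fun hb => h ((hcontains1 p.2).mp hb)
        rw [if_neg hb, if_neg h]
        rw [PySem.Dict.keys_insert_of_not_contains d1 [] (by simpa using h)]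
        simp [h1']
    have h2x : ∀ x, x ∈ a2.2 ↔ d2.contains x = true := by
      intro x
      rw [ha2, hd2]
      by_cases h : d1.contains p.2 = true
      · rw [if_pos ((hcontains1 p.2).mpr h), if_pos h]; exact h2' x
      · have hb : ¬ a1.2.contains p.2 = true := fun hb => h ((hcontains1 p.2).mp hb)
        rw [if_neg hb, if_neg h]
        show x ∈ PySem.Set.add a1.2 p.2 ↔ _
        rw [PySem.Set.mem_add, PySem.Dict.contains_insert]
        simp [h2' x, beq_iff_eq, or_comm]
    -- the two modifies do not change the keys (both endpoints are present in d2)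
    have hd1c : d1.contains p.1 = true := by
      rw [hd1]
      split_ifs with h
      · exact h
      · rw [PySem.Dict.contains_insert]; simp
    have hc1 : d2.contains p.1 = true := by
      rw [hd2]
      split_ifs with h
      · exact hd1c
      · rw [PySem.Dict.contains_insert]; simp [hd1c]
    have hc2 : d2.contains p.2 = true := by
      rw [hd2]
      split_ifs with h
      · exact h
      · rw [PySem.Dict.contains_insert]; simp
    have hstep : pvAdjStep d p = (d2.modify p.1 [] (fun l => l ++ [p.2])).modify p.2 []
        (fun l => l ++ [p.1]) := by
      simp only [pvAdjStep, ← hd1, ← hd2]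
    have hnstep : pvNodeStep acc p = a2 := by
      simp only [pvNodeStep, ← ha1, ← ha2]
    have hkeys : ((d2.modify p.1 [] (fun l => l ++ [p.2])).modify p.2 []
        (fun l => l ++ [p.1])).keys = d2.keys := by
      rw [PySem.Dict.keys_modify, PySem.Dict.keys_insert_of_contains _ _
        (by rw [PySem.Dict.contains_modify]; simp [hc2]),
        PySem.Dict.keys_modify, PySem.Dict.keys_insert_of_contains _ _ hc1]
    have h2y : ∀ x, x ∈ a2.2 ↔ (pvAdjStep d p).contains x = true := by
      intro x
      rw [hstep, PySem.Dict.contains_modify, PySem.Dict.contains_modify, h2x x]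
      constructor
      · intro h; simp [h]
      · intro h
        rcases (by simpa using h : x = p.2 ∨ x = p.1 ∨ d2.contains x = true) with h | h | h
        · exact h ▸ hc2
        · exact h ▸ hc1
        · exact h
    rw [hnstep]
    exact ih (pvAdjStep d p) a2 (by rw [h1x, hstep, hkeys]) h2y

theorem pvNodes_eq (pairs : List ((Int × Int) × (Int × Int))) :
    pvNodes pairs = (pvAdjacency pairs).keys := by
  unfold pvNodes pvAdjacency
  exact pvNodes_gen pairs PySem.Dict.empty ([], PySem.Set.empty)
    (by simp [PySem.Dict.keys_empty]) (by intro x; simp [PySem.Set.empty, PySem.Dict.contains_empty])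

-- ===== VERDICT (by name: the statement is the Claim_ definition above) =====
theorem create_coordinate_chains_spec : Claim_equal_create_coordinate_chains := by
  unfold Claim_equal_create_coordinate_chains Spec_create_coordinate_chains
  intro pairs _
  cases pairs with
  | nil => rfl
  | cons p0 ps =>
    have hnb : pvNeighbors (p0 :: ps) = fun c => (pvAdjacency (p0 :: ps)).getD c [] :=
      funext (pvNeighbors_eq (p0 :: ps))
    simp only [create_coordinate_chains, create_coordinate_chains_alt,
      List.isEmpty_cons, Bool.false_eq_true, if_false, pvNodes_eq, hnb]
    congr 1
    apply congrArg
    apply PySem.List.foldl_congr_mem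
    intro acc x hk
    have hinv := pvAdj_inv (p0 :: ps)
    have hx : x ∈ (p0 :: ps).flatMap (fun p => [p.1, p.2]) := hinv.1 x hk
    by_cases hv : x ∈ acc.2
    · simp [hv]
    · have hF : pvUnvis ((p0 :: ps).flatMap (fun p => [p.1, p.2])) acc.2
          ≤ 2 * (p0 :: ps).length + 1 := by
        have := pvUnvis_le_len ((p0 :: ps).flatMap (fun p => [p.1, p.2])) acc.2
        have := pvFlatMap_len (p0 :: ps)
        omega
      have := pvRun_eq (pvAdjacency (p0 :: ps)) ((p0 :: ps).flatMap (fun p => [p.1, p.2]))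
        hinv (2 * (p0 :: ps).length + 1) x acc.2 hF hx hv
      simp only [List.length_cons] at this
      simp [hv, this]
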